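-- pv_equiv track=rewrite | github.com/voltade/blog-crawler | pepperCloud/pepper-cloud-scrapping.py | clean_filename_for_shell
-- ===== SOURCE A (Python) =====
-- def clean_filename_for_shell(title):
--     """
--     Clean filename to be shell-safe and wrap with parentheses if needed
--     """
--     # Remove or replace problematic characters
--     clean_title = "".join(
--         c for c in title if c.isalnum() or c in (' ', '-', '_', '&', '$', '!', '@', '#', '%', '^', '*', '(', ')', '+', '=', '[', ']', '{', '}', '|', '\\', ':', ';', '"', "'", '<', '>', ',', '.', '?', '/')
--     ).rstrip()
--
--     # Replace spaces with underscores
--     clean_title = clean_title.replace(' ', '_')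
--
--     # Check if filename contains shell special characters that need protection
--     shell_special_chars = ['$', '!', '&', '*', '?', '[', ']',
--                            '{', '}', '|', '\\', ';', '"', "'", '<', '>', '(', ')']
--     needs_protection = any(char in clean_title for char in shell_special_chars)
--
--     if needs_protection:
--         # Wrap with parentheses to make it shell-safe
--         clean_title = f"({clean_title})"
--
--     return clean_title
-- ===== SOURCE B (Python) =====
-- ALLOWED_CHARS = " -_&$!@#%^*()+=[]{}|\\:;\"'<>,.?/"
-- SHELL_SPECIAL_CHARS = "$!&*?[]{}|\\;\"'<>()"
--
--
-- def clean_filename_for_shell(title):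
--     """
--     Clean filename to be shell-safe and wrap with parentheses if needed.
--     Single reverse pass: walking the title from the end fuses the filter,
--     the rstrip (trailing kept spaces are simply never emitted before the
--     first kept non-space character) and the space->underscore replacement,
--     while detecting shell-special characters in the same sweep.
--     """
--     out = []
--     seen = False            # emitted a kept non-space character yet?
--     protect = False
--     for c in reversed(title):
--         if c in SHELL_SPECIAL_CHARS:
--             protect = True
--         if c.isalnum() or c in ALLOWED_CHARS:
--             if c == ' ':
--                 if seen:
--                     out.append('_')
--             else:
--                 out.append(c)
--                 seen = True
--     name = ''.join(reversed(out))
--     return '(' + name + ')' if protect else name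
-- ===== Notes on version B (the rewrite author's own statement) =====
-- stated objective: alternative
-- what changed: Replaces A's staged pipeline (filter comprehension over title, then rstrip, then replace, then an any() of 18 substring searches over the cleaned string) with a single reverse pass over the original title that drops trailing spaces by never emitting a space before the first kept non-space character, replaces interior spaces at emit time, and raises the protection flag in the same sweep.
import Mathlib
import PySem

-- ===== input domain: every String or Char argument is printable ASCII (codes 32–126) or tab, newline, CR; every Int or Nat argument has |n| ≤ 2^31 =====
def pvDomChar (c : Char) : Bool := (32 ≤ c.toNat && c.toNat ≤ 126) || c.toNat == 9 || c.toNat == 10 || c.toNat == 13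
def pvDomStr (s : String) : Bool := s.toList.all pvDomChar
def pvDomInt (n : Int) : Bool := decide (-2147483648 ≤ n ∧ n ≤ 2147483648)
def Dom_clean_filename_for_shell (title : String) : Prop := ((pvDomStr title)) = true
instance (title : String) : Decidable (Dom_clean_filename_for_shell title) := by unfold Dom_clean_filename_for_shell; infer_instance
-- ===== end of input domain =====

-- B replaces A's staged pipeline (filter comprehension, then rstrip, then replace,
-- then an any() scan of the cleaned string) by ONE reverse pass over the original
-- title that fuses all four steps; same return value, alternative structure.

-- ===== PORT A =====
-- the tuple of allowed characters in A's comprehension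
def pvAllowedA : List Char :=
  [' ', '-', '_', '&', '$', '!', '@', '#', '%', '^', '*', '(', ')', '+', '=', '[', ']',
   '{', '}', '|', '\\', ':', ';', '"', '\'', '<', '>', ',', '.', '?', '/']

-- the shell_special_chars list
def pvShellSpecialA : List Char :=
  ['$', '!', '&', '*', '?', '[', ']', '{', '}', '|', '\\', ';', '"', '\'', '<', '>', '(', ')']

def clean_filename_for_shell (title : String) : String :=
  -- "".join(c for c in title if c.isalnum() or c in (...)).rstrip()
  let clean1 := PySem.Chars.rstrip
    (title.toList.filter (fun c => PySem.Chars.isalnum c || pvAllowedA.contains c))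
  -- .replace(' ', '_')
  let clean2 := PySem.Chars.replace clean1 [' '] ['_']
  -- any(char in clean_title for char in shell_special_chars)
  let needs := pvShellSpecialA.any (fun ch => PySem.Chars.isIn [ch] clean2)
  -- f"({clean_title})" when protection is needed
  String.ofList (if needs then '(' :: clean2 ++ [')'] else clean2)

-- ===== PORT B =====
-- ALLOWED_CHARS (a string in Source B; 'c in s' for a single char is char membership — exact)
def pvAllowedB : List Char := " -_&$!@#%^*()+=[]{}|\\:;\"'<>,.?/".toList

-- SHELL_SPECIAL_CHARS
def pvSpecialB : List Char := "$!&*?[]{}|\\;\"'<>()".toList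

-- body of Source B's `for c in reversed(title)` loop; state = (out, seen, protect)
def pvStepB (st : List Char × Bool × Bool) (c : Char) : List Char × Bool × Bool :=
  let protect := if pvSpecialB.contains c then true else st.2.2
  if PySem.Chars.isalnum c || pvAllowedB.contains c then
    if c = ' ' then
      if st.2.1 then (st.1 ++ ['_'], st.2.1, protect) else (st.1, st.2.1, protect)
    else (st.1 ++ [c], true, protect)
  else (st.1, st.2.1, protect)

def clean_filename_for_shell_alt (title : String) : String :=
  -- for c in reversed(title): …
  let st := title.toList.reverse.foldl pvStepB ([], false, false)
  -- name = ''.join(reversed(out))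
  let name := st.1.reverse
  -- '(' + name + ')' if protect else name
  String.ofList (if st.2.2 then '(' :: name ++ [')'] else name)

-- ===== PRECONDITION & SPEC =====
def Spec_clean_filename_for_shell (title : String) (out : String) : Prop := out = clean_filename_for_shell_alt title
instance (title : String) (out : String) : Decidable (Spec_clean_filename_for_shell title out) := by unfold Spec_clean_filename_for_shell; infer_instance

-- ===== CLAIM (what is proved, stated in full; the proofs are below) =====
def Claim_equal_clean_filename_for_shell : Prop := ∀ (title : String), Dom_clean_filename_for_shell title → Spec_clean_filename_for_shell title (clean_filename_for_shell title)

-- ===== LEMMAS AND PROOFS =====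

-- abbreviations for the proofs (not used by the ports)
def pvKeep (c : Char) : Bool := PySem.Chars.isalnum c || pvAllowedA.contains c
def pvRepl (c : Char) : Char := if c = ' ' then '_' else c

-- single-character .replace is a map
theorem pvReplaceGo_singleton (a b : Char) :
    ∀ (fuel : Nat) (l acc : List Char), l.length ≤ fuel →
      PySem.Chars.replace.go [a] [b] fuel l acc
        = acc.reverse ++ l.map (fun c => if c = a then b else c) := by
  intro fuel
  induction fuel with
  | zero =>
    intro l acc h
    cases l with
    | nil => simp [PySem.Chars.replace.go]
    | cons c t => simp at h
  | succ n ih =>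
    intro l acc h
    cases l with
    | nil => simp [PySem.Chars.replace.go]
    | cons c t =>
      by_cases hca : c = a
      · have hpre : List.isPrefixOf [a] (c :: t) = true := by
          simp [List.isPrefixOf, hca]
        rw [PySem.Chars.replace.go, if_pos hpre]
        have : List.drop [a].length (c :: t) = t := by simp
        rw [this, ih t (List.reverse [b] ++ acc) (by simpa using Nat.le_of_succ_le_succ h)]
        simp [hca]
      · have hpre : List.isPrefixOf [a] (c :: t) = false := by
          simp [List.isPrefixOf]
          exact fun hac => absurd hac.symm hca
        rw [PySem.Chars.replace.go, if_neg (by simp [hpre])]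
        rw [ih t (c :: acc) (by simpa using Nat.le_of_succ_le_succ h)]
        simp [hca]

theorem pvReplace_singleton (a b : Char) (l : List Char) :
    PySem.Chars.replace l [a] [b] = l.map (fun c => if c = a then b else c) := by
  rw [PySem.Chars.replace]
  simp only [List.isEmpty_cons]
  simpa using pvReplaceGo_singleton a b l.length l [] le_rfl

-- membership through the space→underscore map, for a character that is neither
theorem pvMem_map_replace (a b ch : Char) (hna : ch ≠ a) (hnb : ch ≠ b) (l : List Char) :
    ch ∈ l.map (fun c => if c = a then b else c) ↔ ch ∈ l := by
  constructor
  · intro h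
    rcases List.mem_map.1 h with ⟨c, hc, hfc⟩
    by_cases hca : c = a
    · rw [if_pos hca] at hfc; exact absurd hfc.symm hnb
    · rw [if_neg hca] at hfc; exact hfc ▸ hc
  · intro h
    exact List.mem_map.2 ⟨ch, h, by rw [if_neg hna]⟩

-- membership through rstrip, for a non-whitespace character
theorem pvMem_rstrip (ch : Char) (hs : PySem.Chars.isspace ch = false) (l : List Char) :
    ch ∈ PySem.Chars.rstrip l ↔ ch ∈ l := by
  rw [PySem.Chars.rstrip, List.mem_reverse]
  constructor
  · intro h
    exact List.mem_reverse.1 ((List.dropWhile_sublist _).subset h)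
  · intro h
    have h' : ch ∈ l.reverse := List.mem_reverse.2 h
    rw [← List.takeWhile_append_dropWhile (p := PySem.Chars.isspace) (l := l.reverse)] at h'
    rcases List.mem_append.1 h' with h'' | h''
    · exact absurd (List.mem_takeWhile_imp h'') (by simp [hs])
    · exact h''

-- the per-character facts about the 18 shell-special characters
theorem pvSpecial_facts :
    ∀ ch ∈ pvShellSpecialA,
      PySem.Chars.isspace ch = false ∧ ch ≠ ' ' ∧ ch ≠ '_' ∧ pvKeep ch = true := by
  intro ch hch
  fin_cases hch <;>
    exact ⟨by decide, by decide, by decide, by decide⟩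

-- A's needs_protection scan over the cleaned string equals B's in-loop flag
theorem pvNeeds_eq (ts : List Char) :
    pvShellSpecialA.any (fun ch =>
      PySem.Chars.isIn [ch]
        ((PySem.Chars.rstrip (ts.filter pvKeep)).map pvRepl))
    = ts.any (fun c => pvSpecialB.contains c) := by
  have hBA : pvSpecialB = pvShellSpecialA := rfl
  rw [hBA]
  rcases Bool.eq_false_or_eq_true
      (ts.any (fun c => pvShellSpecialA.contains c)) with h | h
  · rw [h]
    rw [List.any_eq_true] at h ⊢
    obtain ⟨c, hc, hcs⟩ := h
    rw [List.contains_eq_mem, decide_eq_true_iff] at hcs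
    refine ⟨c, hcs, ?_⟩
    obtain ⟨hs, hna, hnb, hp⟩ := pvSpecial_facts c hcs
    rw [PySem.Chars.isIn_iff_infix]
    have h3 : c ∈ ts.filter pvKeep := List.mem_filter.2 ⟨hc, hp⟩
    have h2 := (pvMem_rstrip c hs _).2 h3
    have h1 := (pvMem_map_replace ' ' '_' c hna hnb _).2 h2
    exact (List.singleton_infix_iff c _).mpr h1
  · rw [h]
    rw [List.any_eq_false] at h ⊢
    intro ch hch
    obtain ⟨hs, hna, hnb, hp⟩ := pvSpecial_facts ch hch
    intro hIn
    have hinf := (PySem.Chars.isIn_iff_infix _ _).1 hIn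
    have hmem : ch ∈ ts := by
      have h1 : ch ∈ (PySem.Chars.rstrip (ts.filter pvKeep)).map
          (fun c => if c = ' ' then '_' else c) := hinf.subset (by simp)
      have h2 := (pvMem_map_replace ' ' '_' ch hna hnb _).1 h1
      have h3 := (pvMem_rstrip ch hs _).1 h2
      exact (List.mem_filter.1 h3).1
    have := h ch hmem
    simp [List.contains_eq_mem, hch] at this

-- within the domain, a whitespace character is space, tab, newline or CR
theorem pvSpace_char (c : Char) (hd : pvDomChar c = true)
    (hs : PySem.Chars.isspace c = true) : c = ' ' ∨ c = '\t' ∨ c = '\n' ∨ c = '\r' := by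
  have hn : c.toNat = 32 ∨ c.toNat = 9 ∨ c.toNat = 10 ∨ c.toNat = 13 := by
    simp [pvDomChar] at hd
    simp [PySem.Chars.isspace] at hs
    omega
  rcases hn with h | h | h | h
  · exact Or.inl (by rw [← Char.ofNat_toNat c, h])
  · exact Or.inr (Or.inl (by rw [← Char.ofNat_toNat c, h]))
  · exact Or.inr (Or.inr (Or.inl (by rw [← Char.ofNat_toNat c, h])))
  · exact Or.inr (Or.inr (Or.inr (by rw [← Char.ofNat_toNat c, h])))

-- for kept in-domain characters, whitespace means exactly the space character
theorem pvKeep_space (c : Char) (hd : pvDomChar c = true) (hk : pvKeep c = true) :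
    PySem.Chars.isspace c = (c == ' ') := by
  by_cases hc : c = ' '
  · subst hc; decide
  · have hbe : (c == ' ') = false := by simp [hc]
    rw [hbe]
    by_cases hs : PySem.Chars.isspace c = true
    · rcases pvSpace_char c hd hs with h | h | h | h
      · exact absurd h hc
      all_goals (subst h; exact absurd hk (by decide))
    · simpa using hs

-- rstrip is empty exactly when everything is whitespace
theorem pvRstrip_nil_iff (l : List Char) :
    PySem.Chars.rstrip l = [] ↔ ∀ c ∈ l, PySem.Chars.isspace c = true := by
  simp [PySem.Chars.rstrip, List.dropWhile_eq_nil_iff]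

-- rstrip of a cons, controlled by whether the tail strips to nothing
theorem pvRstrip_cons (c : Char) (l : List Char) :
    PySem.Chars.rstrip (c :: l) =
      if PySem.Chars.rstrip l = [] then (if PySem.Chars.isspace c then [] else [c])
      else c :: PySem.Chars.rstrip l := by
  simp only [PySem.Chars.rstrip, List.reverse_cons, List.dropWhile_append]
  by_cases h : List.dropWhile PySem.Chars.isspace l.reverse = []
  · rcases hs : PySem.Chars.isspace c with _ | _ <;>
      simp [h, List.dropWhile, hs]
  · simp [h, List.reverse_eq_nil_iff]

-- the "seen a kept non-space character" flag says the cleaned tail is nonempty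
theorem pvSeen_iff (t : List Char) (hd : ∀ c ∈ t, pvDomChar c = true) :
    ((t.filter pvKeep).any (fun c => c != ' ') = false) ↔
      PySem.Chars.rstrip (t.filter pvKeep) = [] := by
  rw [pvRstrip_nil_iff, List.any_eq_false]
  constructor
  · intro h c hc
    have := h c hc
    have hc' := List.mem_filter.1 hc
    rw [pvKeep_space c (hd c hc'.1) hc'.2]
    simpa using this
  · intro h c hc
    have := h c hc
    have hc' := List.mem_filter.1 hc
    rw [pvKeep_space c (hd c hc'.1) hc'.2] at this
    simpa using this

-- B's single reverse pass computes (reversed cleaned name, seen flag, protect flag)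
theorem pvFoldB (l : List Char) (hd : ∀ c ∈ l, pvDomChar c = true) :
    List.foldr (fun c st => pvStepB st c) ([], false, false) l =
      (((PySem.Chars.rstrip (l.filter pvKeep)).map pvRepl).reverse,
       (l.filter pvKeep).any (fun c => c != ' '),
       l.any (fun c => pvSpecialB.contains c)) := by
  induction l with
  | nil => rfl
  | cons c t ih =>
    have hdt : ∀ x ∈ t, pvDomChar x = true := fun x hx => hd x (List.mem_cons_of_mem c hx)
    have hdc : pvDomChar c = true := hd c (List.mem_cons_self ..)
    rw [List.foldr_cons, ih hdt]
    by_cases hk : pvKeep c = true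
    · have hkeq : (PySem.Chars.isalnum c || pvAllowedB.contains c) = true := hk
      have hor : PySem.Chars.isalnum c = true ∨ c ∈ pvAllowedB := by simpa using hkeq
      by_cases hc : c = ' '
      · subst hc
        rcases hS : ((t.filter pvKeep).any fun x => x != ' ') with _ | _
        · have hnil : PySem.Chars.rstrip (t.filter pvKeep) = [] := (pvSeen_iff t hdt).1 hS
          simp [pvStepB, hor, hk, hS, pvRstrip_cons, hnil,
            (by decide : PySem.Chars.isspace ' ' = true)]
        · have hnonnil : ¬ PySem.Chars.rstrip (t.filter pvKeep) = [] := by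
            intro h; simp [(pvSeen_iff t hdt).2 h] at hS
          simp [pvStepB, hor, hk, hS, pvRstrip_cons, hnonnil, pvRepl]
      · have hspace : PySem.Chars.isspace c = false := by
          rw [pvKeep_space c hdc hk]; simp [hc]
        rcases hS : ((t.filter pvKeep).any fun x => x != ' ') with _ | _
        · have hnil : PySem.Chars.rstrip (t.filter pvKeep) = [] := (pvSeen_iff t hdt).1 hS
          have hne : (c != ' ') = true := by simp [hc]
          simp [pvStepB, hor, hk, hS, pvRstrip_cons, hnil, hspace, pvRepl, hc, hne]
        · have hnonnil : ¬ PySem.Chars.rstrip (t.filter pvKeep) = [] := by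
            intro h; simp [(pvSeen_iff t hdt).2 h] at hS
          have hne : (c != ' ') = true := by simp [hc]
          simp [pvStepB, hor, hk, hS, pvRstrip_cons, hnonnil, pvRepl, hc, hne]
    · have hkeq : (PySem.Chars.isalnum c || pvAllowedB.contains c) = false := by
        simpa [pvKeep] using hk
      have hnor : ¬ (PySem.Chars.isalnum c = true ∨ c ∈ pvAllowedB) := by
        simpa using hkeq
      simp [pvStepB, hnor, hk]

-- ===== VERDICT (by name: the statement is the Claim_ definition above) =====
theorem clean_filename_for_shell_spec : Claim_equal_clean_filename_for_shell := by
  intro title hdom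
  have hd : ∀ c ∈ title.toList, pvDomChar c = true := by
    unfold Dom_clean_filename_for_shell pvDomStr at hdom
    simpa [List.all_eq_true] using hdom
  have hfun : (fun c => PySem.Chars.isalnum c || pvAllowedA.contains c) = pvKeep := rfl
  have hrepl : (fun c : Char => if c = ' ' then '_' else c) = pvRepl := rfl
  unfold Spec_clean_filename_for_shell clean_filename_for_shell clean_filename_for_shell_alt
  rw [List.foldl_reverse, pvFoldB title.toList hd]
  simp only [hfun, pvReplace_singleton, hrepl, pvNeeds_eq, List.reverse_reverse]
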